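-- pv_equiv track=rewrite | github.com/wzzClementine/workflow3 | app/skills/segmentation/analysis_segmenter.py | _merge_text_lines_to_question_blocks
-- ===== SOURCE A (Python) =====
-- def _merge_text_lines_to_question_blocks(rects, y_gap_threshold=120):
--     if not rects:
--         return []
--
--     rects = sorted(rects, key=lambda r: r[1])
--
--     merged = []
--     cur_x, cur_y, cur_w, cur_h = rects[0]
--
--     for x, y, w, h in rects[1:]:
--         cur_bottom = cur_y + cur_h
--
--         if y - cur_bottom <= y_gap_threshold:
--             new_x1 = min(cur_x, x)
--             new_y1 = min(cur_y, y)
--             new_x2 = max(cur_x + cur_w, x + w)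
--             new_y2 = max(cur_y + cur_h, y + h)
--
--             cur_x = new_x1
--             cur_y = new_y1
--             cur_w = new_x2 - new_x1
--             cur_h = new_y2 - new_y1
--         else:
--             merged.append((cur_x, cur_y, cur_w, cur_h))
--             cur_x, cur_y, cur_w, cur_h = x, y, w, h
--
--     merged.append((cur_x, cur_y, cur_w, cur_h))
--     return merged
-- ===== SOURCE B (Python) =====
-- def _merge_text_lines_to_question_blocks(rects, y_gap_threshold=120):
--     if not rects:
--         return []
--
--     rects = sorted(rects, key=lambda r: r[1])
--
--     # Pass 1: group y-sorted rects into clusters, starting a new cluster when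
--     # the next rect's top is more than y_gap_threshold below the cluster's
--     # running maximum bottom.
--     clusters = []
--     cur = [rects[0]]
--     max_bottom = rects[0][1] + rects[0][3]
--     for r in rects[1:]:
--         if r[1] - max_bottom <= y_gap_threshold:
--             cur.append(r)
--             max_bottom = max(max_bottom, r[1] + r[3])
--         else:
--             clusters.append(cur)
--             cur = [r]
--             max_bottom = r[1] + r[3]
--     clusters.append(cur)
--
--     # Pass 2: each cluster's bounding box.
--     out = []
--     for c in clusters:
--         x1 = min(r[0] for r in c)
--         y1 = min(r[1] for r in c)
--         x2 = max(r[0] + r[2] for r in c)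
--         y2 = max(r[1] + r[3] for r in c)
--         out.append((x1, y1, x2 - x1, y2 - y1))
--     return out
-- ===== Notes on version B (the rewrite author's own statement) =====
-- stated objective: simpler
-- what changed: Replaces the stateful running-rectangle merge loop with a group-then-reduce decomposition: one pass groups the y-sorted rects into clusters by a running max-bottom, a second pass reduces each cluster to its bounding box.
import Mathlib
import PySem

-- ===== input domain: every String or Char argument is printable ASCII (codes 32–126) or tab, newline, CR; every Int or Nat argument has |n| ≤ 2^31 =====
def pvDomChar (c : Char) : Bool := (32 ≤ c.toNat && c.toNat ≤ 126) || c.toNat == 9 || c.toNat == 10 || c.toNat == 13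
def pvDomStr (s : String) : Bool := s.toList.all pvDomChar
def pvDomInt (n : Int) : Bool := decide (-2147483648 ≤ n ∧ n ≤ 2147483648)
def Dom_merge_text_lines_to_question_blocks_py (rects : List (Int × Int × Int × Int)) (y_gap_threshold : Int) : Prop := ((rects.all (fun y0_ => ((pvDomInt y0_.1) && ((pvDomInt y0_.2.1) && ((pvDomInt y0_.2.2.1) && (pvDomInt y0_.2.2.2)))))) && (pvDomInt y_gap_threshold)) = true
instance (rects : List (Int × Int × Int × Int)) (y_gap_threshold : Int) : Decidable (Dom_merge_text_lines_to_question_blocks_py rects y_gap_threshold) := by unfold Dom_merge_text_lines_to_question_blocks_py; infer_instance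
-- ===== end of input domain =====

-- B replaces A's stateful running-rectangle merge loop with a group-then-reduce
-- decomposition (cluster the y-sorted rects by a running max-bottom, then take
-- each cluster's bounding box); objective: simpler.

-- ===== PORT A =====
-- one loop step of A: merge the next rect into the current rectangle or emit it
def pvStepA (t : Int) (st : List (Int × Int × Int × Int) × (Int × Int × Int × Int))
    (r : Int × Int × Int × Int) : List (Int × Int × Int × Int) × (Int × Int × Int × Int) :=
  let (merged, c) := st
  let (cx, cy, cw, ch) := c
  let (x, y, w, h) := r
  if y - (cy + ch) ≤ t then
    let nx1 := min cx x
    let ny1 := min cy y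
    let nx2 := max (cx + cw) (x + w)
    let ny2 := max (cy + ch) (y + h)
    (merged, (nx1, ny1, nx2 - nx1, ny2 - ny1))
  else
    (merged ++ [c], r)

def merge_text_lines_to_question_blocks_py (rects : List (Int × Int × Int × Int)) (y_gap_threshold : Int) : List (Int × Int × Int × Int) :=
  match PySem.List.sorted rects (fun r => r.2.1) with
  | [] => []   -- 'if not rects: return []'
  | r0 :: rest =>
    let st := rest.foldl (pvStepA y_gap_threshold) ([], r0)  -- st = (merged, cur)
    st.1 ++ [st.2]

-- ===== PORT B =====
-- min/max of a list of ints, Python min(...)/max(...) on a NONEMPTY iterable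
-- (B only applies them to nonempty clusters; the [] case is unreachable)
def pvMinInts : List Int → Int
  | [] => 0
  | a :: l => l.foldl min a

def pvMaxInts : List Int → Int
  | [] => 0
  | a :: l => l.foldl max a

-- bounding box of a cluster (pass 2 body)
def pvBBox (c : List (Int × Int × Int × Int)) : Int × Int × Int × Int :=
  let x1 := pvMinInts (c.map (fun r => r.1))
  let y1 := pvMinInts (c.map (fun r => r.2.1))
  let x2 := pvMaxInts (c.map (fun r => r.1 + r.2.2.1))
  let y2 := pvMaxInts (c.map (fun r => r.2.1 + r.2.2.2))
  (x1, y1, x2 - x1, y2 - y1)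

-- one step of pass 1: extend the current cluster or close it
def pvStepB (t : Int)
    (st : List (List (Int × Int × Int × Int)) × List (Int × Int × Int × Int) × Int)
    (r : Int × Int × Int × Int) :
    List (List (Int × Int × Int × Int)) × List (Int × Int × Int × Int) × Int :=
  let (clusters, cur, mb) := st
  if r.2.1 - mb ≤ t then
    (clusters, cur ++ [r], max mb (r.2.1 + r.2.2.2))
  else
    (clusters ++ [cur], [r], r.2.1 + r.2.2.2)

def merge_text_lines_to_question_blocks_py_alt (rects : List (Int × Int × Int × Int)) (y_gap_threshold : Int) : List (Int × Int × Int × Int) :=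
  match PySem.List.sorted rects (fun r => r.2.1) with
  | [] => []
  | r0 :: rest =>
    let st := rest.foldl (pvStepB y_gap_threshold) ([], [r0], r0.2.1 + r0.2.2.2)  -- st = (clusters, cur, max_bottom)
    (st.1 ++ [st.2.1]).map pvBBox

-- ===== PRECONDITION & SPEC =====
def Spec_merge_text_lines_to_question_blocks_py (rects : List (Int × Int × Int × Int)) (y_gap_threshold : Int) (out : List (Int × Int × Int × Int)) : Prop := out = merge_text_lines_to_question_blocks_py_alt rects y_gap_threshold
instance (rects : List (Int × Int × Int × Int)) (y_gap_threshold : Int) (out : List (Int × Int × Int × Int)) : Decidable (Spec_merge_text_lines_to_question_blocks_py rects y_gap_threshold out) := by unfold Spec_merge_text_lines_to_question_blocks_py; infer_instance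

-- ===== CLAIM (what is proved, stated in full; the proofs are below) =====
def Claim_equal_merge_text_lines_to_question_blocks_py : Prop := ∀ (rects : List (Int × Int × Int × Int)) (y_gap_threshold : Int), Dom_merge_text_lines_to_question_blocks_py rects y_gap_threshold → Spec_merge_text_lines_to_question_blocks_py rects y_gap_threshold (merge_text_lines_to_question_blocks_py rects y_gap_threshold)

-- ===== LEMMAS AND PROOFS =====

lemma pvMinInts_snoc (a : Int) (l : List Int) (b : Int) :
    pvMinInts (a :: (l ++ [b])) = min (pvMinInts (a :: l)) b := by
  simp [pvMinInts, List.foldl_append]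

lemma pvMaxInts_snoc (a : Int) (l : List Int) (b : Int) :
    pvMaxInts (a :: (l ++ [b])) = max (pvMaxInts (a :: l)) b := by
  simp [pvMaxInts, List.foldl_append]

lemma pvBBox_one (r : Int × Int × Int × Int) : pvBBox [r] = r := by
  obtain ⟨x, y, w, h⟩ := r
  simp [pvBBox, pvMinInts, pvMaxInts]

-- the current rectangle's bottom (y + h) is the cluster's max bottom
lemma pvBBox_bottom (a : Int × Int × Int × Int) (l : List (Int × Int × Int × Int)) :
    (pvBBox (a :: l)).2.1 + (pvBBox (a :: l)).2.2.2
      = pvMaxInts ((a :: l).map (fun r => r.2.1 + r.2.2.2)) := by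
  simp [pvBBox]

-- extending a nonempty cluster by one rect = A's merge of the bbox with that rect
lemma pvBBox_snoc (a : Int × Int × Int × Int) (l : List (Int × Int × Int × Int))
    (r : Int × Int × Int × Int) :
    pvBBox ((a :: l) ++ [r]) =
      (min (pvBBox (a :: l)).1 r.1,
       min (pvBBox (a :: l)).2.1 r.2.1,
       max ((pvBBox (a :: l)).1 + (pvBBox (a :: l)).2.2.1) (r.1 + r.2.2.1)
         - min (pvBBox (a :: l)).1 r.1,
       max ((pvBBox (a :: l)).2.1 + (pvBBox (a :: l)).2.2.2) (r.2.1 + r.2.2.2)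
         - min (pvBBox (a :: l)).2.1 r.2.1) := by
  simp only [pvBBox, List.cons_append, List.map_cons, List.map_append, List.map_nil]
  rw [pvMinInts_snoc, pvMinInts_snoc, pvMaxInts_snoc, pvMaxInts_snoc]
  simp only [Prod.mk.injEq]
  refine ⟨trivial, trivial, ?_, ?_⟩ <;> omega

-- main loop correspondence: A's (merged, cur) state vs B's (clusters, cluster, max-bottom)
lemma pv_loop (t : Int) (rest : List (Int × Int × Int × Int))
    (acc : List (Int × Int × Int × Int))
    (clusters : List (List (Int × Int × Int × Int)))
    (a : Int × Int × Int × Int) (l : List (Int × Int × Int × Int))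
    (hacc : acc = clusters.map pvBBox) :
    (rest.foldl (pvStepA t) (acc, pvBBox (a :: l))).1
        ++ [(rest.foldl (pvStepA t) (acc, pvBBox (a :: l))).2] =
    ((rest.foldl (pvStepB t)
        (clusters, a :: l, pvMaxInts ((a :: l).map (fun q => q.2.1 + q.2.2.2)))).1
      ++ [(rest.foldl (pvStepB t)
        (clusters, a :: l, pvMaxInts ((a :: l).map (fun q => q.2.1 + q.2.2.2)))).2.1]).map pvBBox := by
  induction rest generalizing acc clusters a l with
  | nil => simp [hacc]
  | cons r rs ih =>
    simp only [List.foldl_cons]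
    have hb := pvBBox_bottom a l
    by_cases hc : r.2.1 - pvMaxInts ((a :: l).map (fun q => q.2.1 + q.2.2.2)) ≤ t
    · have hstepA : pvStepA t (acc, pvBBox (a :: l)) r
          = (acc, pvBBox ((a :: l) ++ [r])) := by
        obtain ⟨x, y, w, h⟩ := r
        simp only [pvStepA]
        rw [if_pos (by rw [hb]; simpa using hc)]
        rw [pvBBox_snoc]
      have hstepB : pvStepB t (clusters, a :: l, pvMaxInts ((a :: l).map (fun q => q.2.1 + q.2.2.2))) r
          = (clusters, (a :: l) ++ [r],
             pvMaxInts (((a :: l) ++ [r]).map (fun q => q.2.1 + q.2.2.2))) := by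
        simp only [pvStepB]
        rw [if_pos hc]
        simp only [List.cons_append, List.map_cons, List.map_append, List.map_nil]
        rw [pvMaxInts_snoc]
      rw [hstepA, hstepB]
      have := ih acc clusters a (l ++ [r]) hacc
      simpa using this
    · have hstepA : pvStepA t (acc, pvBBox (a :: l)) r
          = (acc ++ [pvBBox (a :: l)], r) := by
        obtain ⟨x, y, w, h⟩ := r
        simp only [pvStepA]
        rw [if_neg (by rw [hb]; simpa using hc)]
      have hstepB : pvStepB t (clusters, a :: l, pvMaxInts ((a :: l).map (fun q => q.2.1 + q.2.2.2))) r
          = (clusters ++ [a :: l], [r], r.2.1 + r.2.2.2) := by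
        simp only [pvStepB]
        rw [if_neg hc]
      rw [hstepA, hstepB]
      have := ih (acc ++ [pvBBox (a :: l)]) (clusters ++ [a :: l]) r []
        (by simp [hacc])
      simpa [pvBBox_one, pvMaxInts] using this

-- ===== VERDICT (by name: the statement is the Claim_ definition above) =====
theorem merge_text_lines_to_question_blocks_py_spec : Claim_equal_merge_text_lines_to_question_blocks_py := by
  intro rects t _
  unfold Spec_merge_text_lines_to_question_blocks_py
  unfold merge_text_lines_to_question_blocks_py merge_text_lines_to_question_blocks_py_alt
  cases h : PySem.List.sorted rects (fun r => r.2.1) with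
  | nil => rfl
  | cons r0 rest =>
    have := pv_loop t rest [] [] r0 [] (by simp)
    simpa [pvBBox_one, pvMaxInts] using this
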